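-- pv_equiv track=rewrite | github.com/SeLino98/Secret-Algo-Study | jeongmin/힙/더 맵게.py | solution
-- ===== SOURCE A (Python) =====
-- import heapq
--
-- def solution(scoville, K):
--     count = 0
--     heapq.heapify(scoville)   # heap으로 만들어주고
--
--     while len(scoville) > 1:    # heap 길이가 1이기 전까지 반복해서 계산
--         first = heapq.heappop(scoville)
--         if first >= K:    # 첫번째가 K보다 크면 조건 성공이니까 count 반환
--             return count
--         second = heapq.heappop(scoville)
--         heapq.heappush(scoville, first + second*2)  # 문제와 같이 연산
--         count += 1
--
--     return count if scoville[0] >= K else -1  # 다 계산했는데도 K보다 안크면 -1 반환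
-- ===== SOURCE B (Python) =====
-- def solution(scoville, K):
--     # Sort once, then keep the working list sorted by ordered insertion of each
--     # mixed value; the minimum is always the head (no heap, input not mutated).
--     q = sorted(scoville)
--     count = 0
--     while len(q) > 1:
--         first = q[0]
--         if first >= K:
--             return count
--         new = first + q[1] * 2
--         q = q[2:]
--         i = 0
--         while i < len(q) and q[i] < new:
--             i += 1
--         q.insert(i, new)
--         count += 1
--     return count if q[0] >= K else -1
-- ===== Notes on version B (the rewrite author's own statement) =====
-- stated objective: alternative
-- what changed: Replaces the heap with a single initial sort plus a sorted working list whose minimum is its head and into which each mixed value is inserted at its ordered position; B does not mutate the input list (A heapifies and pops it in place), return values are identical.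
import Mathlib
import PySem

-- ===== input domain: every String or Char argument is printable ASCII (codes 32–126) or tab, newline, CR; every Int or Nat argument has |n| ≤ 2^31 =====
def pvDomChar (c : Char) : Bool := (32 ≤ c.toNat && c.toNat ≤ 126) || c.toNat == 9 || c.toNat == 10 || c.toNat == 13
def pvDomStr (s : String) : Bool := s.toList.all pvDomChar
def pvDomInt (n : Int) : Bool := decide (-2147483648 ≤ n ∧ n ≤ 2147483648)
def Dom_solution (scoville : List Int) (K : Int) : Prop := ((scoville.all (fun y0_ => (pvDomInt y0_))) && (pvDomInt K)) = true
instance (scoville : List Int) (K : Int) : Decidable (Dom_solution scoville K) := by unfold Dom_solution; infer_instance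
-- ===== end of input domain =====

-- B keeps a sorted list instead of A's heap; the return values agree (A also mutates
-- its argument in place, B does not — the equivalence proved is about the return value).

-- ===== PORT A =====
-- heapq on a list of ints is modelled as a multiset: heappop returns and removes
-- one occurrence of the minimum VALUE (exact for Int elements, whose heap order is
-- their value order); heappush appends; heapify is a no-op on the multiset.
def popMin : List Int → Option (Int × List Int)
  | [] => none
  | x :: xs =>
    match popMin xs with
    | none => some (x, [])
    | some (m, rest) => if x ≤ m then some (x, xs) else some (m, x :: rest)

theorem popMin_cons_isSome (x : Int) (xs : List Int) : (popMin (x :: xs)).isSome := by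
  simp only [popMin]
  cases popMin xs with
  | none => rfl
  | some p => obtain ⟨m, rest⟩ := p; dsimp only; split <;> rfl

theorem popMin_none_iff (l : List Int) : popMin l = none ↔ l = [] := by
  cases l with
  | nil => simp [popMin]
  | cons x xs =>
    simp only [List.cons_ne_nil, iff_false]
    intro hc
    have hs := popMin_cons_isSome x xs
    rw [hc] at hs
    simp at hs

theorem popMin_length : ∀ (l : List Int) m r, popMin l = some (m, r) → r.length + 1 = l.length := by
  intro l
  induction l with
  | nil => intro m r h; simp [popMin] at h
  | cons x xs ih =>
    intro m r h
    cases hx : popMin xs with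
    | none =>
      have hnil : xs = [] := (popMin_none_iff xs).1 hx
      subst hnil
      simp [popMin] at h
      obtain ⟨h1, h2⟩ := h
      subst h2
      simp
    | some p =>
      obtain ⟨m', rest⟩ := p
      simp only [popMin, hx] at h
      split at h <;> simp only [Option.some.injEq, Prod.mk.injEq] at h <;>
        obtain ⟨h1, h2⟩ := h <;> subst h2
      · simp
      · have := ih m' rest hx
        simp
        omega

def solGoA (K : Int) (h : List Int) (count : Int) : Int :=
  if hl : h.length > 1 then
    match hp : popMin h with
    | none => 0  -- unreachable totalization guard (popMin of a nonempty list is some)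
    | some (first, h1) =>
      if first ≥ K then count
      else
        match hp2 : popMin h1 with
        | none => 0  -- unreachable totalization guard
        | some (second, h2) =>
          solGoA K (h2 ++ [first + second * 2]) (count + 1)
  else
    match h with
    | [] => 0  -- unreachable under Pre_solution (Python raises IndexError here)
    | x :: _ => if x ≥ K then count else -1
termination_by h.length
decreasing_by
  have e1 := popMin_length h first h1 hp
  have e2 := popMin_length h1 second h2 hp2
  simp only [List.length_append, List.length_cons, List.length_nil]
  omega

def solution (scoville : List Int) (K : Int) : Int := solGoA K scoville 0

-- ===== PORT B =====
def sortedInsert (x : Int) : List Int → List Int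
  | [] => [x]
  | y :: ys => if y < x then y :: sortedInsert x ys else x :: y :: ys

theorem length_sortedInsert (x : Int) : ∀ (l : List Int), (sortedInsert x l).length = l.length + 1 := by
  intro l
  induction l with
  | nil => rfl
  | cons y ys ih => simp only [sortedInsert]; split <;> simp [ih]

def solGoB (K : Int) (q : List Int) (count : Int) : Int :=
  match q with
  | [] => 0  -- unreachable under Pre_solution (Python raises IndexError here)
  | [x] => if x ≥ K then count else -1
  | a :: b :: rest =>
    if a ≥ K then count
    else solGoB K (sortedInsert (a + b * 2) rest) (count + 1)
termination_by q.length
decreasing_by simp [length_sortedInsert]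

def solution_alt (scoville : List Int) (K : Int) : Int :=
  solGoB K (PySem.List.sorted scoville (fun x => x) false) 0

-- ===== PRECONDITION & SPEC =====
-- Pre_ excludes only the empty list, on which A raises IndexError (scoville[0]); B raises there too.
def Pre_solution (scoville : List Int) (K : Int) : Prop := scoville ≠ []
instance (scoville : List Int) (K : Int) : Decidable (Pre_solution scoville K) := by unfold Pre_solution; infer_instance
def pvWitness_solution : List Int × Int := ([1, 2, 3, 9, 10, 12], 7)

def Spec_solution (scoville : List Int) (K : Int) (out : Int) : Prop := out = solution_alt scoville K
instance (scoville : List Int) (K : Int) (out : Int) : Decidable (Spec_solution scoville K out) := by unfold Spec_solution; infer_instance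

-- ===== CLAIM (what is proved, stated in full; the proofs are below) =====
def Claim_equal_solution : Prop := ∀ (scoville : List Int) (K : Int), Dom_solution scoville K → Pre_solution scoville K → Spec_solution scoville K (solution scoville K)

-- ===== LEMMAS AND PROOFS =====

theorem popMin_spec : ∀ (l : List Int) m r, popMin l = some (m, r) →
    (m :: r).Perm l ∧ ∀ x ∈ l, m ≤ x := by
  intro l
  induction l with
  | nil => intro m r h; simp [popMin] at h
  | cons x xs ih =>
    intro m r h
    cases hx : popMin xs with
    | none =>
      have hnil : xs = [] := (popMin_none_iff xs).1 hx
      subst hnil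
      simp [popMin] at h
      obtain ⟨h1, h2⟩ := h
      subst h1; subst h2
      simp
    | some p =>
      obtain ⟨m', rest⟩ := p
      simp only [popMin, hx] at h
      obtain ⟨hperm, hmin⟩ := ih m' rest hx
      split at h <;> simp only [Option.some.injEq, Prod.mk.injEq] at h <;>
        obtain ⟨h1, h2⟩ := h <;> subst h1 <;> subst h2
      · rename_i hle
        refine ⟨List.Perm.refl _, ?_⟩
        intro y hy
        rcases List.mem_cons.1 hy with rfl | hy
        · exact le_refl _
        · exact le_trans hle (hmin y hy)
      · rename_i hlt
        refine ⟨(List.Perm.swap _ _ _).trans (hperm.cons x), ?_⟩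
        intro y hy
        rcases List.mem_cons.1 hy with rfl | hy
        · omega
        · exact hmin y hy

theorem sortedInsert_perm (x : Int) : ∀ (l : List Int), (sortedInsert x l).Perm (x :: l) := by
  intro l
  induction l with
  | nil => simp [sortedInsert]
  | cons y ys ih =>
    simp only [sortedInsert]
    split
    · exact (ih.cons y).trans (List.Perm.swap x y ys)
    · exact List.Perm.refl _

theorem sortedInsert_pairwise (x : Int) : ∀ (l : List Int), l.Pairwise (· ≤ ·) →
    (sortedInsert x l).Pairwise (· ≤ ·) := by
  intro l
  induction l with
  | nil => intro _; simp [sortedInsert]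
  | cons y ys ih =>
    intro hp
    rw [List.pairwise_cons] at hp
    obtain ⟨hy, hys⟩ := hp
    simp only [sortedInsert]
    split
    · rename_i hlt
      rw [List.pairwise_cons]
      refine ⟨?_, ih hys⟩
      intro z hz
      rcases List.mem_cons.1 ((sortedInsert_perm x ys).mem_iff.1 hz) with rfl | h
      · omega
      · exact hy z h
    · rename_i hnlt
      rw [List.pairwise_cons]
      refine ⟨?_, List.pairwise_cons.2 ⟨hy, hys⟩⟩
      intro z hz
      rcases List.mem_cons.1 hz with rfl | hz
      · omega
      · exact le_trans (by omega) (hy z hz)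

-- Core: A's multiset loop and B's sorted-list loop agree when the states are
-- permutations of each other and B's state is sorted.
theorem go_eq (K : Int) : ∀ (n : ℕ) (h s : List Int) (count : Int),
    h.length ≤ n → s.Perm h → s.Pairwise (· ≤ ·) → h ≠ [] →
    solGoA K h count = solGoB K s count := by
  intro n
  induction n with
  | zero =>
    intro h s count hlen hperm _ hne
    cases h with
    | nil => exact absurd rfl hne
    | cons a as => simp at hlen
  | succ n ih =>
    intro h s count hlen hperm hsorted hne
    cases s with
    | nil =>
      exact absurd (hperm.symm.eq_nil) hne
    | cons a t =>
      cases t with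
      | nil =>
        have hh : h = [a] := List.perm_singleton.1 hperm.symm
        subst hh
        rw [solGoA.eq_def, solGoB.eq_def]
        simp
      | cons b rest =>
        have hlen2 : h.length = rest.length + 2 := by
          have := hperm.length_eq; simp at this; omega
        have hgt : h.length > 1 := by omega
        rw [solGoA.eq_def, dif_pos hgt]
        split
        · rename_i hp
          exact absurd ((popMin_none_iff h).1 hp) hne
        · rename_i first h1 hp
          obtain ⟨hperm1, hmin1⟩ := popMin_spec h first h1 hp
          have hsa : ∀ x ∈ (a :: b :: rest), a ≤ x := by
            intro x hx
            rcases List.mem_cons.1 hx with rfl | hx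
            · exact le_refl _
            · exact List.rel_of_pairwise_cons hsorted hx
          have hfa : first = a := by
            have h1m : first ∈ h := hperm1.mem_iff.1 List.mem_cons_self
            have h2m : a ∈ h := hperm.mem_iff.1 List.mem_cons_self
            have := hmin1 a h2m
            have := hsa first (hperm.symm.mem_iff.1 h1m)
            omega
          subst hfa
          by_cases hK : first ≥ K
          · rw [if_pos hK, solGoB.eq_def]
            simp [hK]
          · rw [if_neg hK]
            have hperm1' : h1.Perm (b :: rest) := by
              have : (first :: h1).Perm (first :: b :: rest) := hperm1.trans hperm.symm
              exact this.cons_inv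
            split
            · rename_i hp2
              exfalso
              have := (popMin_none_iff h1).1 hp2
              subst this
              have := hperm1'.length_eq; simp at this
            · rename_i second h2 hp2
              obtain ⟨hperm2, hmin2⟩ := popMin_spec h1 second h2 hp2
              have hsb : ∀ x ∈ (b :: rest), b ≤ x := by
                intro x hx
                rcases List.mem_cons.1 hx with rfl | hx
                · exact le_refl _
                · exact List.rel_of_pairwise_cons (List.pairwise_cons.1 hsorted).2 hx
              have hsbeq : second = b := by
                have h1m : second ∈ h1 := hperm2.mem_iff.1 List.mem_cons_self
                have h2m : b ∈ h1 := hperm1'.symm.mem_iff.1 List.mem_cons_self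
                have := hmin2 b h2m
                have := hsb second (hperm1'.mem_iff.1 h1m)
                omega
              subst hsbeq
              have hperm2' : h2.Perm rest := by
                have : (second :: h2).Perm (second :: rest) := hperm2.trans hperm1'
                exact this.cons_inv
              have hB : solGoB K (first :: second :: rest) count =
                  if first ≥ K then count else
                    solGoB K (sortedInsert (first + second * 2) rest) (count + 1) := by
                rw [solGoB.eq_def]
              rw [hB, if_neg hK]
              apply ih
              · have := hperm2'.length_eq
                simp only [List.length_append, List.length_cons, List.length_nil]
                omega
              · exact (sortedInsert_perm _ rest).trans
                  ((hperm2'.symm.cons _).trans (List.perm_append_singleton _ _).symm)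
              · exact sortedInsert_pairwise _ rest (List.pairwise_cons.1 (List.pairwise_cons.1 hsorted).2).2
              · intro hcontra
                simp at hcontra

-- ===== VERDICT (by name: the statement is the Claim_ definition above) =====
theorem solution_spec : Claim_equal_solution := by
  intro scoville K _ hpre
  unfold Spec_solution solution solution_alt
  exact go_eq K scoville.length scoville (PySem.List.sorted scoville (fun x => x) false) 0
    (le_refl _) (PySem.List.sorted_perm _ _ _) (by simpa using PySem.List.sorted_pairwise scoville (fun x => x)) hpre
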